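-- pv_equiv track=rewrite | github.com/azhu51/leetcode-practice | contest/medium_5386.py | checkBreak
-- ===== SOURCE A (Python) =====
-- def checkBreak(sub1, sub2):
--   n = len(sub1)
--   check_set = set()
--   for i in range(0, n):
--     if sub1[i] == sub2[i]:
--       continue
--     if sub1[i] > sub2[i]:
--       check_set.add(True)
--     else:
--       check_set.add(False)
--   return len(check_set) == 1
-- ===== SOURCE B (Python) =====
-- def checkBreak(sub1, sub2):
--     pairs = list(zip(sub1, sub2))
--     greater = any(a > b for a, b in pairs)
--     less = any(a < b for a, b in pairs)
--     return greater != less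
-- ===== Notes on version B (the rewrite author's own statement) =====
-- stated objective: simpler
-- what changed: Replaces the per-character set accumulator with two any() flags over zip(sub1,sub2) and returns their XOR.
import Mathlib
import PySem

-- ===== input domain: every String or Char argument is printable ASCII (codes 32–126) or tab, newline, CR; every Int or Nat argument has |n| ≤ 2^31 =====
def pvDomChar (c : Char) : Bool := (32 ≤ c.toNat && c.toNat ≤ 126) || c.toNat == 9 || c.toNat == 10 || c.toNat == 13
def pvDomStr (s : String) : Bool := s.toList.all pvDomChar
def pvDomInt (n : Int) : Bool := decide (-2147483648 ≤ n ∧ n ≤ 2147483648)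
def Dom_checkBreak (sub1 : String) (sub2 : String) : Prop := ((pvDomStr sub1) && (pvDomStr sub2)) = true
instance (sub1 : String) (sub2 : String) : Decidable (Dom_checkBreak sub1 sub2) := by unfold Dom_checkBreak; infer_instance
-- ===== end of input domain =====

-- B replaces A's set-of-comparison-signs accumulator with two any-flags over zip(sub1, sub2)
-- and returns their XOR (objective: simpler).

-- ===== PORT A =====
def checkBreak (sub1 : String) (sub2 : String) : Bool :=
  let n : Int := PySem.Str.len sub1
  let checkSet : PySem.Set Bool :=
    (PySem.List.pyRange 0 n 1).foldl (fun st i =>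
      -- sub1[i] / sub2[i]; the none branch is unreachable under Pre_ (IndexError in Python)
      match PySem.Str.pyGet? sub1 i, PySem.Str.pyGet? sub2 i with
      | some c1, some c2 =>
        if c1 == c2 then st
        else if c1 > c2 then PySem.Set.add st true
        else PySem.Set.add st false
      | _, _ => st) PySem.Set.empty
  PySem.Set.len checkSet == 1

-- ===== PORT B =====
def checkBreak_alt (sub1 : String) (sub2 : String) : Bool :=
  let pairs := sub1.toList.zip sub2.toList
  let greater := pairs.any (fun p => p.1 > p.2)
  let less := pairs.any (fun p => p.1 < p.2)
  greater != less

-- ===== PRECONDITION & SPEC =====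
-- Pre_ excludes exactly the inputs where A raises IndexError: sub2 shorter than sub1.
def Pre_checkBreak (sub1 : String) (sub2 : String) : Prop :=
  sub1.toList.length ≤ sub2.toList.length
instance (sub1 : String) (sub2 : String) : Decidable (Pre_checkBreak sub1 sub2) := by
  unfold Pre_checkBreak; infer_instance
def pvWitness_checkBreak : String × String := ("abc", "abd")

def Spec_checkBreak (sub1 : String) (sub2 : String) (out : Bool) : Prop := out = checkBreak_alt sub1 sub2
instance (sub1 : String) (sub2 : String) (out : Bool) : Decidable (Spec_checkBreak sub1 sub2 out) := by unfold Spec_checkBreak; infer_instance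

-- ===== CLAIM (what is proved, stated in full; the proofs are below) =====
def Claim_equal_checkBreak : Prop := ∀ (sub1 : String) (sub2 : String), Dom_checkBreak sub1 sub2 → Pre_checkBreak sub1 sub2 → Spec_checkBreak sub1 sub2 (checkBreak sub1 sub2)

-- ===== LEMMAS AND PROOFS =====

-- A's loop body, as a step function on pairs of characters.
def gstep (st : List Bool) (p : Char × Char) : List Bool :=
  if p.1 == p.2 then st
  else if p.1 > p.2 then PySem.Set.add st true
  else PySem.Set.add st false

-- A's indexed loop equals a fold of gstep over the zipped character lists.
lemma fold_take (l1 l2 : List Char) (h : l1.length ≤ l2.length) (m : Nat) (hm : m ≤ l1.length)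
    (s : List Bool) :
    ((List.range m).map (fun (k : Nat) => (k : Int))).foldl (fun st i =>
      match PySem.Chars.pyGet? l1 i, PySem.Chars.pyGet? l2 i with
      | some c1, some c2 =>
        if c1 == c2 then st
        else if c1 > c2 then PySem.Set.add st true
        else PySem.Set.add st false
      | _, _ => st) s
    = ((l1.zip l2).take m).foldl gstep s := by
  induction m generalizing s with
  | zero => simp
  | succ m ih =>
    have hm' : m ≤ l1.length := Nat.le_of_succ_le hm
    have h1 : m < l1.length := hm
    have h2 : m < l2.length := lt_of_lt_of_le h1 h
    have hz : m < (l1.zip l2).length := by simp [List.length_zip]; omega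
    rw [List.range_succ, List.map_append, List.foldl_append, ih hm']
    have htake : (l1.zip l2).take (m + 1) = (l1.zip l2).take m ++ [(l1[m], l2[m])] := by
      rw [List.take_add_one]
      simp [List.getElem?_eq_getElem hz]
    rw [htake, List.foldl_append]
    simp [PySem.Chars.pyGet?, h1, h2, gstep]

-- membership characterisation of the gstep fold
lemma true_mem_fold (pairs : List (Char × Char)) (s : List Bool) :
    (true ∈ pairs.foldl gstep s) ↔ true ∈ s ∨ pairs.any (fun p => p.1 > p.2) = true := by
  induction pairs generalizing s with
  | nil => simp
  | cons p t ih =>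
    rcases p with ⟨a, b⟩
    simp only [List.foldl_cons, List.any_cons, ih, gstep]
    split_ifs with h1 h2
    · have hng : ¬ (a > b) := by
        simp only [beq_iff_eq] at h1
        simp [h1]
      simp_all [PySem.Set.mem_add]
      try tauto
    · simp_all [PySem.Set.mem_add]
      try tauto
    · simp_all
      try simp [not_lt.mpr h2]
      try tauto

lemma false_mem_fold (pairs : List (Char × Char)) (s : List Bool) :
    (false ∈ pairs.foldl gstep s) ↔ false ∈ s ∨ pairs.any (fun p => p.1 < p.2) = true := by
  induction pairs generalizing s with
  | nil => simp
  | cons p t ih =>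
    rcases p with ⟨a, b⟩
    simp only [List.foldl_cons, List.any_cons, ih, gstep]
    split_ifs with h1 h2
    · have hnl : ¬ (a < b) := by
        simp only [beq_iff_eq] at h1
        simp [h1]
      simp_all [PySem.Set.mem_add]
      try tauto
    · have hnl : ¬ (a < b) := lt_asymm h2
      simp_all
      try simp [not_lt.mpr hnl]
      try tauto
    · have hne : a ≠ b := by simpa using h1
      have hlt : a < b := lt_of_le_of_ne (not_lt.mp h2) hne
      simp_all [PySem.Set.mem_add]
      try tauto

lemma nodup_fold (pairs : List (Char × Char)) (s : List Bool) (hs : s.Nodup) :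
    (pairs.foldl gstep s).Nodup := by
  induction pairs generalizing s with
  | nil => simpa
  | cons p t ih =>
    apply ih
    unfold gstep
    split_ifs <;>
      first
        | exact hs
        | exact PySem.Set.nodup_add _ _ hs

lemma len_one_iff (S : List Bool) (h : S.Nodup) :
    (S.length = 1) ↔ ¬ ((true ∈ S) ↔ (false ∈ S)) := by
  rcases S with _ | ⟨a, _ | ⟨b, _ | ⟨c, t⟩⟩⟩
  · simp
  · cases a <;> simp
  · have hab : a ≠ b := by simp [List.nodup_cons] at h; tauto
    cases a <;> cases b <;> simp_all
  · exfalso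
    simp only [List.nodup_cons, List.mem_cons] at h
    cases a <;> cases b <;> cases c <;> tauto

-- ===== VERDICT (by name: the statement is the Claim_ definition above) =====
theorem checkBreak_spec : Claim_equal_checkBreak := by
  unfold Claim_equal_checkBreak
  intro sub1 sub2 _ hpre
  unfold Spec_checkBreak
  unfold Pre_checkBreak at hpre
  simp only [checkBreak, checkBreak_alt, PySem.Str.pyGet?, PySem.Str.len]
  rw [PySem.List.pyRange_one]
  rw [show (((sub1.toList.length : Int)) - 0).toNat = sub1.toList.length by omega]
  simp only [zero_add]
  rw [fold_take sub1.toList sub2.toList hpre sub1.toList.length le_rfl PySem.Set.empty]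
  have htake : (sub1.toList.zip sub2.toList).take sub1.toList.length
      = sub1.toList.zip sub2.toList := by
    apply List.take_of_length_le
    simp [List.length_zip]
  rw [htake]
  set pairs := sub1.toList.zip sub2.toList with hp
  have hnd : (pairs.foldl gstep PySem.Set.empty).Nodup := nodup_fold _ _ (by simp [PySem.Set.empty])
  have hT := true_mem_fold pairs PySem.Set.empty
  have hF := false_mem_fold pairs PySem.Set.empty
  have hlen := len_one_iff _ hnd
  rw [hT, hF] at hlen
  cases hg : pairs.any (fun p => p.1 > p.2) <;> cases hl : pairs.any (fun p => p.1 < p.2) <;>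
    simp_all [PySem.Set.len, PySem.Set.empty]
  -- remaining: both flags false — neither strict comparison occurs, so both sides are empty
  constructor
  · rintro ⟨a, b, hmem, hba⟩
    exact absurd hba (not_lt.mpr (hg a b hmem))
  · rintro ⟨a, b, hmem, hab⟩
    exact absurd hab (not_lt.mpr (hl a b hmem))
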